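-- pv_equiv track=rewrite | github.com/Redcom1988/s3-college-stuff | tbo/Tugas2/dfa.py | hat_delta_dfa
-- ===== SOURCE A (Python) =====
-- def delta_dfa(state, symbol, transitions):
--     return transitions.get((state, symbol))
--
-- def hat_delta_dfa(state, input_string, transitions):
--     if len(input_string) == 0:
--         return state
--     else:
--         a, x = input_string[-1], input_string[:-1]
--         next_state = hat_delta_dfa(state, x, transitions)
--         result = delta_dfa(next_state, a, transitions)
--         return result
-- ===== SOURCE B (Python) =====
-- def hat_delta_dfa(state, input_string, transitions):
--     current = state
--     for ch in input_string:
--         current = transitions.get((current, ch))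
--     return current
-- ===== Notes on version B (the rewrite author's own statement) =====
-- stated objective: faster
-- what changed: Replaced the right-recursive definition that re-slices input_string[:-1] at every level with a single iterative left-to-right pass applying the transition lookup per character.
import Mathlib
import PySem

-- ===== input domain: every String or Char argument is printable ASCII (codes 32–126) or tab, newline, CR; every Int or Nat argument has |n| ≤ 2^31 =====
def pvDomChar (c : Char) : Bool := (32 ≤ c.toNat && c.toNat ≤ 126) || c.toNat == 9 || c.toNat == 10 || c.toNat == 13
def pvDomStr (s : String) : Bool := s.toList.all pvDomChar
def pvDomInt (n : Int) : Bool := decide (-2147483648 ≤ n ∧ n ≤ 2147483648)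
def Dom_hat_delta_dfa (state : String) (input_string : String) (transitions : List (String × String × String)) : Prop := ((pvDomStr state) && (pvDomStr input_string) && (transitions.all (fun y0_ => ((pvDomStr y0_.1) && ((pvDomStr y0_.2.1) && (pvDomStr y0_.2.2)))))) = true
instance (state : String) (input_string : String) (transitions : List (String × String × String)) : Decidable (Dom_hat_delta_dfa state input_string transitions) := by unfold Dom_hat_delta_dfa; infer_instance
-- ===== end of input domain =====

-- B replaces A's right-recursion with repeated input_string[:-1] slicing by one
-- iterative left-to-right pass applying the transition lookup per character (O(n) vs O(n^2)).


-- ===== PORT A =====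
-- delta_dfa: transitions.get((state, symbol)); 'state' may be None (the propagated
-- failed lookup), in which case no String-keyed entry matches and get returns None.
def delta_dfaA (st : Option String) (symbol : String) (transitions : List (String × String × String)) : Option String :=
  match st with
  | none => none
  | some s => (transitions.find? (fun p => p.1 == s && p.2.1 == symbol)).map (fun p => p.2.2)

-- recursion on the character list: a = input_string[-1], x = input_string[:-1]
def hat_delta_dfaA_aux (state : String) (transitions : List (String × String × String)) : List Char → Option String
  | [] => some state
  | c :: cs =>
      let next_state := hat_delta_dfaA_aux state transitions ((c :: cs).dropLast)
      delta_dfaA next_state (String.mk [(c :: cs).getLast (by simp)]) transitions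
termination_by cs => cs.length
decreasing_by simp

def hat_delta_dfa (state : String) (input_string : String) (transitions : List (String × String × String)) : Option String :=
  hat_delta_dfaA_aux state transitions input_string.toList

-- ===== PORT B =====
-- one left-to-right pass: current = transitions.get((current, ch)) for each ch
def hat_delta_dfa_alt (state : String) (input_string : String) (transitions : List (String × String × String)) : Option String :=
  input_string.toList.foldl
    (fun current ch =>
      match current with
      | none => none
      | some s => (transitions.find? (fun p => p.1 == s && p.2.1 == String.mk [ch])).map (fun p => p.2.2))
    (some state)

-- ===== PRECONDITION & SPEC =====
def Spec_hat_delta_dfa (state : String) (input_string : String) (transitions : List (String × String × String)) (out : Option String) : Prop := out = hat_delta_dfa_alt state input_string transitions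
instance (state : String) (input_string : String) (transitions : List (String × String × String)) (out : Option String) : Decidable (Spec_hat_delta_dfa state input_string transitions out) := by unfold Spec_hat_delta_dfa; infer_instance

-- ===== CLAIM (what is proved, stated in full; the proofs are below) =====
def Claim_equal_hat_delta_dfa : Prop := ∀ (state : String) (input_string : String) (transitions : List (String × String × String)), Dom_hat_delta_dfa state input_string transitions → Spec_hat_delta_dfa state input_string transitions (hat_delta_dfa state input_string transitions)

-- ===== LEMMAS AND PROOFS =====

-- unfolding A's aux on a list ending in c
theorem hat_delta_dfaA_aux_append (state : String) (transitions : List (String × String × String))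
    (cs : List Char) (c : Char) :
    hat_delta_dfaA_aux state transitions (cs ++ [c])
      = delta_dfaA (hat_delta_dfaA_aux state transitions cs) (String.mk [c]) transitions := by
  cases h : cs ++ [c] with
  | nil => simp at h
  | cons d ds =>
      rw [hat_delta_dfaA_aux]
      have hne : cs ++ [c] ≠ [] := by simp
      have h1 : (d :: ds).dropLast = cs := by rw [← h]; simp
      have h2 : (d :: ds).getLast (by simp) = c := by
        simp only [← h]; simp
      simp only [h1, h2]

theorem aux_eq_foldl (state : String) (transitions : List (String × String × String))
    (cs : List Char) :
    hat_delta_dfaA_aux state transitions cs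
      = cs.foldl
          (fun current ch =>
            match current with
            | none => none
            | some s => (transitions.find? (fun p => p.1 == s && p.2.1 == String.mk [ch])).map (fun p => p.2.2))
          (some state) := by
  induction cs using List.reverseRecOn with
  | nil => rw [hat_delta_dfaA_aux]; rfl
  | append_singleton cs c ih =>
      rw [hat_delta_dfaA_aux_append, List.foldl_append, ih]
      cases cs.foldl
          (fun current ch =>
            match current with
            | none => none
            | some s => (transitions.find? (fun p => p.1 == s && p.2.1 == String.mk [ch])).map (fun p => p.2.2))
          (some state) with
      | none => rfl
      | some s => rfl

-- ===== VERDICT (by name: the statement is the Claim_ definition above) =====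
theorem hat_delta_dfa_spec : Claim_equal_hat_delta_dfa := by
  intro state input_string transitions _
  unfold Spec_hat_delta_dfa hat_delta_dfa hat_delta_dfa_alt
  exact aux_eq_foldl state transitions input_string.toList
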